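-- pv_equiv track=rewrite | github.com/meet989898/PostgreSQL-NYC-Project | NY Bus Data_Phase2.py | compute_pi_alpha
-- ===== SOURCE A (Python) =====
-- def compute_pi_alpha(relation, attributes):
--     """
--     Function to make the partition dictionary for Alpha side of comparison
--     :param relation: rows of the table
--     :param attributes: the list of attributes on the left side of the comparison
--     :return: the dictionary that contains the partitions for the left side of the comparison
--     """
--     pi_alpha = {}
--     for x, row in enumerate(relation):
--         pi_row = tuple(row[attr] for attr in attributes)
--         if pi_row in pi_alpha:
--             pi_alpha[pi_row].add(x)
--         else:
--             pi_alpha[pi_row] = {x}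
--     return pi_alpha
-- ===== SOURCE B (Python) =====
-- def compute_pi_alpha(relation, attributes):
--     """
--     Two-phase re-implementation: first compute every row's key tuple, then
--     fill each partition completely (by scanning the key list) at the key's
--     first occurrence, instead of growing sets incrementally row by row.
--     """
--     keys = [tuple(row[attr] for attr in attributes) for row in relation]
--     pi_alpha = {}
--     for key in keys:
--         if key not in pi_alpha:
--             pi_alpha[key] = {i for i, k in enumerate(keys) if k == key}
--     return pi_alpha
-- ===== Notes on version B (the rewrite author's own statement) =====
-- stated objective: alternative
-- what changed: B first materialises the list of key tuples, then builds each partition's full index set by one scan of that key list at the key's first occurrence, instead of A's single pass that grows a set incrementally per row.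
import Mathlib
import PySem

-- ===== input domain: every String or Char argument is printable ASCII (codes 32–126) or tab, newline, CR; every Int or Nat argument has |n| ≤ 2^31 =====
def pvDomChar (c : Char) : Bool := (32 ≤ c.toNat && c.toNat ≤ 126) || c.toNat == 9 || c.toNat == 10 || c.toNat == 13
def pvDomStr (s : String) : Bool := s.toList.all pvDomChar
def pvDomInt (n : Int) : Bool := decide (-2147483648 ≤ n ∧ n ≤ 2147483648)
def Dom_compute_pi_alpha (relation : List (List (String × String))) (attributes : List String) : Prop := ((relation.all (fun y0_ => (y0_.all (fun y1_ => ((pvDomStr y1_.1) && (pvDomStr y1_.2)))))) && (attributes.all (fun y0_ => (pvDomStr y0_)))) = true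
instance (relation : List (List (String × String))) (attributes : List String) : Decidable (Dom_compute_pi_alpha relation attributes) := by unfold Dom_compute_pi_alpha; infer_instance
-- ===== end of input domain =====

-- Alternative re-implementation: B materialises the key tuple of every row first, then
-- fills each partition's complete index set (one scan of the key list) at the key's
-- first occurrence; A grows each set incrementally row by row. Equivalence on Pre_.

-- ===== PORT A =====
-- row[attr]: dict lookup; Pre_ excludes the KeyError case, so getD's default is never read
def pvRowKeyA (row : List (String × String)) (attributes : List String) : List String :=
  attributes.map (fun attr => (PySem.Dict.mk row).getD attr "")

def pvStepA (d : PySem.Dict (List String) (PySem.Set Int)) (x : Int) (piRow : List String) :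
    PySem.Dict (List String) (PySem.Set Int) :=
  if d.contains piRow then d.modify piRow PySem.Set.empty (fun s => PySem.Set.add s x)
  else d.insert piRow (PySem.Set.ofList [x])

def compute_pi_alpha (relation : List (List (String × String))) (attributes : List String) : List (List String × List Int) :=
  ((PySem.List.enumerate relation 0).foldl
      (fun d p => pvStepA d p.1 (pvRowKeyA p.2 attributes))
      PySem.Dict.empty).items

-- ===== PORT B =====
def pvRowKeyB (row : List (String × String)) (attributes : List String) : List String :=
  attributes.map (fun attr => (PySem.Dict.mk row).getD attr "")

-- {i for i, k in enumerate(keys) if k == key}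
def pvIndicesB (keys : List (List String)) (key : List String) : PySem.Set Int :=
  PySem.Set.ofList (((PySem.List.enumerate keys 0).filter (fun p => p.2 == key)).map (·.1))

def compute_pi_alpha_alt (relation : List (List (String × String))) (attributes : List String) : List (List String × List Int) :=
  let keys := relation.map (fun row => pvRowKeyB row attributes)
  (keys.foldl
      (fun d key => if d.contains key then d else d.insert key (pvIndicesB keys key))
      PySem.Dict.empty).items

-- ===== PRECONDITION & SPEC =====
-- Pre_: every attribute occurs as a key of every row (otherwise Python A raises KeyError)
def Pre_compute_pi_alpha (relation : List (List (String × String))) (attributes : List String) : Prop :=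
  ∀ row ∈ relation, ∀ attr ∈ attributes, attr ∈ row.map (·.1)
instance (relation : List (List (String × String))) (attributes : List String) : Decidable (Pre_compute_pi_alpha relation attributes) := by unfold Pre_compute_pi_alpha; infer_instance

def pvWitness_compute_pi_alpha : (List (List (String × String))) × List String :=
  ([[("a", "1"), ("b", "x")], [("a", "1"), ("b", "y")], [("a", "2"), ("b", "x")]], ["a"])

def Spec_compute_pi_alpha (relation : List (List (String × String))) (attributes : List String) (out : List (List String × List Int)) : Prop := out = compute_pi_alpha_alt relation attributes
instance (relation : List (List (String × String))) (attributes : List String) (out : List (List String × List Int)) : Decidable (Spec_compute_pi_alpha relation attributes out) := by unfold Spec_compute_pi_alpha; infer_instance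

-- ===== CLAIM (what is proved, stated in full; the proofs are below) =====
def Claim_equal_compute_pi_alpha : Prop := ∀ (relation : List (List (String × String))) (attributes : List String), Dom_compute_pi_alpha relation attributes → Pre_compute_pi_alpha relation attributes → Spec_compute_pi_alpha relation attributes (compute_pi_alpha relation attributes)

-- ===== LEMMAS AND PROOFS =====

-- indices of the occurrences of k in L (what B's comprehension computes, pre-ofList)
def pvIdx (L : List (List String)) (k : List String) : List Int :=
  ((PySem.List.enumerate L 0).filter (fun p => p.2 == k)).map (·.1)

theorem pv_enumerate_append_singleton {α : Type} (L : List α) (x : α) (s : Int) :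
    PySem.List.enumerate (L ++ [x]) s = PySem.List.enumerate L s ++ [(s + L.length, x)] := by
  induction L generalizing s with
  | nil => simp [PySem.List.enumerate]
  | cons a t ih =>
      simp [PySem.List.enumerate, ih (s + 1)]
      ring_nf

theorem pv_enumerate_map {α β : Type} (f : α → β) (L : List α) (s : Int) :
    PySem.List.enumerate (L.map f) s = (PySem.List.enumerate L s).map (fun p => (p.1, f p.2)) := by
  induction L generalizing s with
  | nil => simp [PySem.List.enumerate]
  | cons a t ih => simp [PySem.List.enumerate, ih (s + 1)]

theorem pv_idx_append (L : List (List String)) (x k : List String) :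
    pvIdx (L ++ [x]) k = pvIdx L k ++ (if x = k then [(L.length : Int)] else []) := by
  simp [pvIdx, pv_enumerate_append_singleton, List.filter_append]
  split_ifs with h <;> simp [h]

theorem pv_idx_of_not_mem (L : List (List String)) (k : List String) (h : k ∉ L) :
    pvIdx L k = [] := by
  simp [pvIdx, List.filter_eq_nil_iff]
  intro a b hmem
  have : b ∈ L := by
    have := congrArg (List.map Prod.snd) (rfl : PySem.List.enumerate L 0 = PySem.List.enumerate L 0)
    have hs := PySem.List.map_snd_enumerate L (0 : Int)
    have : (a, b).2 ∈ (PySem.List.enumerate L 0).map Prod.snd := List.mem_map_of_mem hmem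
    rwa [hs] at this
  intro he; exact h (he ▸ this)

-- the A-side fold, over an arbitrary key list
def pvFoldA (L : List (List String)) : PySem.Dict (List String) (PySem.Set Int) :=
  (PySem.List.enumerate L 0).foldl (fun d p => pvStepA d p.1 p.2) PySem.Dict.empty

theorem pvFoldA_spec (L : List (List String)) :
    (pvFoldA L).keys = PySem.Set.ofList L ∧
    ∀ k, (pvFoldA L).getD k PySem.Set.empty = PySem.Set.ofList (pvIdx L k) := by
  induction L using List.reverseRecOn with
  | nil =>
      constructor
      · simp [pvFoldA, PySem.List.enumerate, PySem.Set.ofList]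
      · intro k; simp [pvFoldA, PySem.List.enumerate, pvIdx]
  | append_singleton L x ih =>
      obtain ⟨hk, hg⟩ := ih
      have hstep : pvFoldA (L ++ [x]) = pvStepA (pvFoldA L) (L.length : Int) x := by
        simp [pvFoldA, pv_enumerate_append_singleton, List.foldl_append]
      have hcont : (pvFoldA L).contains x = decide (x ∈ L) := by
        rw [PySem.Dict.contains_eq_decide_mem_keys, hk]
        simp [PySem.Set.mem_ofList]
      by_cases hx : x ∈ L
      · have hct : (pvFoldA L).contains x = true := by simp [hcont, hx]
        constructor
        · rw [hstep, pvStepA, if_pos hct, PySem.Dict.keys_modify,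
              PySem.Dict.keys_insert_of_contains, hk, PySem.Set.ofList_append_singleton,
              PySem.Set.add_of_mem]
          · simpa [PySem.Set.mem_ofList] using hx
          · exact hct
        · intro k
          rw [hstep, pvStepA, if_pos hct, PySem.Dict.getD_modify, pv_idx_append]
          by_cases hkx : k = x
          · subst hkx
            rw [if_pos rfl, if_pos rfl, PySem.Set.ofList_append_singleton]
            exact congrArg (fun s => PySem.Set.add s (L.length : Int)) (hg k)
          · have hxk : ¬ x = k := fun h => hkx h.symm
            simp only [if_neg hkx, if_neg hxk, List.append_nil]
            exact hg k
      · have hcf : (pvFoldA L).contains x = false := by simp [hcont, hx]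
        constructor
        · rw [hstep, pvStepA, if_neg (by simp [hcf]), PySem.Dict.keys_insert_of_not_contains _ _ hcf,
              hk, PySem.Set.ofList_append_singleton, PySem.Set.add_of_not_mem]
          simpa [PySem.Set.mem_ofList] using hx
        · intro k
          rw [hstep, pvStepA, if_neg (by simp [hcf]), PySem.Dict.getD_insert, pv_idx_append]
          by_cases hkx : k = x
          · subst hkx
            simp [pv_idx_of_not_mem L k hx, PySem.Set.ofList]
          · have hxk : ¬ x = k := fun h => hkx h.symm
            simp only [if_neg hkx, if_neg hxk, List.append_nil]
            exact hg k

-- the B-side fold, over an arbitrary key list with an arbitrary value function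
def pvFoldB (M : List (List String)) (v : List String → PySem.Set Int) : PySem.Dict (List String) (PySem.Set Int) :=
  M.foldl (fun d key => if d.contains key then d else d.insert key (v key)) PySem.Dict.empty

theorem pvFoldB_spec (M : List (List String)) (v : List String → PySem.Set Int) :
    (pvFoldB M v).keys = PySem.Set.ofList M ∧
    ∀ k, (pvFoldB M v).getD k PySem.Set.empty = if k ∈ M then v k else PySem.Set.empty := by
  induction M using List.reverseRecOn with
  | nil =>
      constructor
      · simp [pvFoldB, PySem.Set.ofList]
      · intro k; simp [pvFoldB]
  | append_singleton M x ih =>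
      obtain ⟨hk, hg⟩ := ih
      have hstep : pvFoldB (M ++ [x]) v =
          (if (pvFoldB M v).contains x then pvFoldB M v else (pvFoldB M v).insert x (v x)) := by
        simp [pvFoldB, List.foldl_append]
      have hcont : (pvFoldB M v).contains x = decide (x ∈ M) := by
        rw [PySem.Dict.contains_eq_decide_mem_keys, hk]
        simp [PySem.Set.mem_ofList]
      by_cases hx : x ∈ M
      · have hct : (pvFoldB M v).contains x = true := by simp [hcont, hx]
        rw [hstep, if_pos hct]
        constructor
        · rw [hk, PySem.Set.ofList_append_singleton, PySem.Set.add_of_mem]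
          simpa [PySem.Set.mem_ofList] using hx
        · intro k
          rw [hg k]
          by_cases hkM : k ∈ M
          · simp [hkM]
          · have hkx : k ≠ x := fun h => hkM (h ▸ hx)
            simp [hkM, hkx]
      · have hcf : (pvFoldB M v).contains x = false := by simp [hcont, hx]
        rw [hstep, if_neg (by simp [hcf])]
        constructor
        · rw [PySem.Dict.keys_insert_of_not_contains _ _ hcf, hk,
              PySem.Set.ofList_append_singleton, PySem.Set.add_of_not_mem]
          simpa [PySem.Set.mem_ofList] using hx
        · intro k
          rw [PySem.Dict.getD_insert, hg k]
          by_cases hkx : k = x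
          · subst hkx; simp [hx]
          · simp [hkx]

-- ===== VERDICT (by name: the statement is the Claim_ definition above) =====
theorem pv_items_eq (L : List (List String)) :
    (pvFoldA L).items = (pvFoldB L (fun k => PySem.Set.ofList (pvIdx L k))).items := by
  obtain ⟨hka, hga⟩ := pvFoldA_spec L
  obtain ⟨hkb, hgb⟩ := pvFoldB_spec L (fun k => PySem.Set.ofList (pvIdx L k))
  rw [PySem.Dict.items_eq_map_keys _ (hka ▸ PySem.Set.nodup_ofList L) PySem.Set.empty,
      PySem.Dict.items_eq_map_keys _ (hkb ▸ PySem.Set.nodup_ofList L) PySem.Set.empty,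
      hka, hkb]
  apply List.map_congr_left
  intro k hkmem
  have hkL : k ∈ L := (PySem.Set.mem_ofList _ _).1 hkmem
  rw [hga k, hgb k, if_pos hkL]

theorem compute_pi_alpha_spec : Claim_equal_compute_pi_alpha := by
  intro relation attributes _ _
  unfold Spec_compute_pi_alpha
  show compute_pi_alpha relation attributes = _
  have hA : compute_pi_alpha relation attributes =
      (pvFoldA (relation.map (fun row => pvRowKeyA row attributes))).items := by
    simp [compute_pi_alpha, pvFoldA, pv_enumerate_map, List.foldl_map]
  have hB : compute_pi_alpha_alt relation attributes =
      (pvFoldB (relation.map (fun row => pvRowKeyA row attributes))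
        (fun k => PySem.Set.ofList (pvIdx (relation.map (fun row => pvRowKeyA row attributes)) k))).items := by
    rfl
  rw [hA, hB, pv_items_eq]
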